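-- pv_equiv track=rewrite | github.com/GabrielCalin/PlotKing | step4_chapter_writer.py | _build_previous_summary
-- ===== SOURCE A (Python) =====
-- def _build_previous_summary(previous_texts, max_chars=1000):
--     if not previous_texts:
--         return "None"
--     # Provide a short context summary: titles + first ~300 chars of each existing chapter
--     parts = []
--     for idx, txt in enumerate(previous_texts):
--         snippet = txt[:300].replace("\n", " ").strip()
--         parts.append(f"Chapter {idx+1} excerpt: {snippet}...")
--         if sum(len(p) for p in parts) > max_chars:
--             break
--     return "\n".join(parts)
-- ===== SOURCE B (Python) =====
-- from itertools import accumulate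
--
-- def _build_previous_summary(previous_texts, max_chars=1000):
--     if not previous_texts:
--         return "None"
--     parts = [f"Chapter {i + 1} excerpt: {txt[:300].replace(chr(10), ' ').strip()}..."
--              for i, txt in enumerate(previous_texts)]
--     totals = accumulate(map(len, parts))
--     cut = next((i for i, tot in enumerate(totals) if tot > max_chars), len(parts) - 1)
--     return "\n".join(parts[:cut + 1])
-- ===== Notes on version B (the rewrite author's own statement) =====
-- stated objective: faster
-- what changed: Replaces A's loop that re-sums all accumulated part lengths on every iteration (quadratic in the kept parts) with a declarative pipeline: build all formatted parts by comprehension, take running length totals with itertools.accumulate, find the first crossing index, and slice inclusively.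
import Mathlib
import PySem

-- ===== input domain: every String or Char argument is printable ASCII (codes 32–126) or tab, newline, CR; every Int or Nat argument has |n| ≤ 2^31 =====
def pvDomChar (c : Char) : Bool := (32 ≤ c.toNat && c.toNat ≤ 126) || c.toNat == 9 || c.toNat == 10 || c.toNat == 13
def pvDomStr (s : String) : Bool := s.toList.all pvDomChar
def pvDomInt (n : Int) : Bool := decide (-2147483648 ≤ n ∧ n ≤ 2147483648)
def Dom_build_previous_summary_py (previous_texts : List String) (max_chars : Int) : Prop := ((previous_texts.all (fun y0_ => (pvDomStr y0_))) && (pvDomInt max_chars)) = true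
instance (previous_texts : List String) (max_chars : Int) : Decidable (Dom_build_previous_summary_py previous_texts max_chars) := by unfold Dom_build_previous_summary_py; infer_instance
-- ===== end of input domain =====

-- B replaces A's loop (which re-sums all part lengths every iteration) by a
-- comprehension + running-total (accumulate) + inclusive-slice pipeline; same results.

-- ===== PORT A =====
-- f"Chapter {idx+1} excerpt: {snippet}..." with snippet = txt[:300].replace("\n"," ").strip()
def pvFmtA (idx : Int) (txt : String) : String :=
  "Chapter " ++ PySem.Int.toStr (idx + 1) ++ " excerpt: " ++
    PySem.Str.strip (PySem.Str.replace (PySem.Str.slice txt none (some 300)) "\n" " ") ++ "..."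

-- the for-loop with early break; sum(len(p) for p in parts) ported as a fold over parts
def pvLoopA (max_chars : Int) : List (Int × String) → List String → List String
  | [], parts => parts
  | (idx, txt) :: rest, parts =>
    let parts' := parts ++ [pvFmtA idx txt]
    if (parts'.foldl (fun acc p => acc + (PySem.Str.len p : Int)) 0) > max_chars then parts'
    else pvLoopA max_chars rest parts'

def build_previous_summary_py (previous_texts : List String) (max_chars : Int) : String :=
  if previous_texts = [] then "None"
  else PySem.Str.join "\n" (pvLoopA max_chars (PySem.List.enumerate previous_texts 0) [])

-- ===== PORT B =====
def pvFmtB (i : Int) (txt : String) : String :=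
  "Chapter " ++ PySem.Int.toStr (i + 1) ++ " excerpt: " ++
    PySem.Str.strip (PySem.Str.replace (PySem.Str.slice txt none (some 300)) "\n" " ") ++ "..."

-- itertools.accumulate over the lengths (running totals, no initial value)
def pvAccum (s : Int) : List Int → List Int
  | [] => []
  | x :: xs => (s + x) :: pvAccum (s + x) xs

def build_previous_summary_py_alt (previous_texts : List String) (max_chars : Int) : String :=
  if previous_texts = [] then "None"
  else
    let parts := (PySem.List.enumerate previous_texts 0).map (fun p => pvFmtB p.1 p.2)
    let totals := pvAccum 0 (parts.map (fun p => (PySem.Str.len p : Int)))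
    let cut := (totals.findIdx? (fun t => t > max_chars)).getD (parts.length - 1)
    PySem.Str.join "\n" (parts.take (cut + 1))

-- ===== PRECONDITION & SPEC =====
def Spec_build_previous_summary_py (previous_texts : List String) (max_chars : Int) (out : String) : Prop := out = build_previous_summary_py_alt previous_texts max_chars
instance (previous_texts : List String) (max_chars : Int) (out : String) : Decidable (Spec_build_previous_summary_py previous_texts max_chars out) := by unfold Spec_build_previous_summary_py; infer_instance

-- ===== CLAIM (what is proved, stated in full; the proofs are below) =====
def Claim_equal_build_previous_summary_py : Prop := ∀ (previous_texts : List String) (max_chars : Int), Dom_build_previous_summary_py previous_texts max_chars → Spec_build_previous_summary_py previous_texts max_chars (build_previous_summary_py previous_texts max_chars)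

-- ===== LEMMAS AND PROOFS =====

-- proof-side reference: keep parts until the running length total first exceeds m (inclusively)
def pvCut (m : Int) (s : Int) : List String → List String
  | [] => []
  | p :: ps =>
    if s + (PySem.Str.len p : Int) > m then [p]
    else p :: pvCut m (s + (PySem.Str.len p : Int)) ps

theorem pvSumLen_append_singleton (parts : List String) (p : String) :
    ((parts ++ [p]).foldl (fun acc q => acc + (PySem.Str.len q : Int)) 0)
      = parts.foldl (fun acc q => acc + (PySem.Str.len q : Int)) 0 + (PySem.Str.len p : Int) := by
  simp

theorem pvLoopA_eq_cut (m : Int) (L : List (Int × String)) :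
    ∀ parts, pvLoopA m L parts
      = parts ++ pvCut m (parts.foldl (fun acc q => acc + (PySem.Str.len q : Int)) 0) (L.map (fun p => pvFmtA p.1 p.2)) := by
  induction L with
  | nil => intro parts; simp [pvLoopA, pvCut]
  | cons hd tl ih =>
    intro parts
    obtain ⟨idx, txt⟩ := hd
    simp only [pvLoopA, List.map_cons, pvCut]
    rw [pvSumLen_append_singleton]
    split_ifs with h
    · rfl
    · rw [ih]
      simp

theorem pvTake_findIdx_eq_cut (m : Int) (ps : List String) :
    ∀ s, ps.take ((((pvAccum s (ps.map (fun p => (PySem.Str.len p : Int)))).findIdx? (fun t => t > m)).getD (ps.length - 1)) + 1)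
      = pvCut m s ps := by
  induction ps with
  | nil => intro s; simp [pvAccum, pvCut]
  | cons p ps ih =>
    intro s
    simp only [List.map_cons, pvAccum, List.findIdx?_cons, pvCut]
    by_cases h : s + (PySem.Str.len p : Int) > m
    · have h' : m < s + (p.length : Int) := by simpa using h
      simp [h']
    · simp only [h, decide_false]
      rcases hfi : (pvAccum (s + (PySem.Str.len p : Int)) (ps.map (fun q => (PySem.Str.len q : Int)))).findIdx? (fun t => t > m) with _ | k
      · have := ih (s + (PySem.Str.len p : Int))
        rw [hfi] at this
        simp only [Option.getD_none] at this
        simp only [Option.map_none, List.length_cons]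
        rw [Nat.add_sub_cancel, List.take_succ_cons, ← this]
        congr 1
        cases ps with
        | nil => simp
        | cons q qs => simp
      · have := ih (s + (PySem.Str.len p : Int))
        rw [hfi] at this
        simp only [Option.getD_some] at this
        have h2 : ¬ m < s + (p.length : Int) := by simpa using h
        have this' : List.take (k + 1) ps = pvCut m (s + (p.length : Int)) ps := by
          simpa using this
        have hfi' := hfi
        simp only [PySem.Str.len_eq, String.length_toList] at hfi'
        simp [this']

theorem pvFmtB_eq_fmtA : pvFmtB = pvFmtA := rfl

-- ===== VERDICT (by name: the statement is the Claim_ definition above) =====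
theorem build_previous_summary_py_spec : Claim_equal_build_previous_summary_py := by
  intro pts m _
  unfold Spec_build_previous_summary_py build_previous_summary_py build_previous_summary_py_alt
  by_cases hpts : pts = []
  · simp [hpts]
  · simp only [if_neg hpts]
    rw [pvLoopA_eq_cut]
    simp only [List.nil_append, List.foldl_nil, pvFmtB_eq_fmtA]
    rw [pvTake_findIdx_eq_cut]
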